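-- pv_equiv track=rewrite | github.com/Luiz-Henrique28/lista-complexidade | Computabilidade-e-Complexidade-de-Algoritmos-main/python/1.py | afd_termina_com_1
-- ===== SOURCE A (Python) =====
-- def afd_termina_com_1(s):
--     estado = 'q0'
--     for char in s:
--         if estado == 'q0':
--             if char == '0':
--                 estado = 'q0'
--             elif char == '1':
--                 estado = 'q1'
--         elif estado == 'q1':
--             if char == '0':
--                 estado = 'q0'
--             elif char == '1':
--                 estado = 'q1'
--     return estado == 'q1'
-- ===== SOURCE B (Python) =====
-- def afd_termina_com_1(s):
--     for char in reversed(s):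
--         if char == '1':
--             return True
--         if char == '0':
--             return False
--     return False
-- ===== Notes on version B (the rewrite author's own statement) =====
-- stated objective: simpler
-- what changed: Replaces the forward two-state DFA scan of the whole string with a backward early-exit scan that returns at the first binary digit found from the end.
import Mathlib
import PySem

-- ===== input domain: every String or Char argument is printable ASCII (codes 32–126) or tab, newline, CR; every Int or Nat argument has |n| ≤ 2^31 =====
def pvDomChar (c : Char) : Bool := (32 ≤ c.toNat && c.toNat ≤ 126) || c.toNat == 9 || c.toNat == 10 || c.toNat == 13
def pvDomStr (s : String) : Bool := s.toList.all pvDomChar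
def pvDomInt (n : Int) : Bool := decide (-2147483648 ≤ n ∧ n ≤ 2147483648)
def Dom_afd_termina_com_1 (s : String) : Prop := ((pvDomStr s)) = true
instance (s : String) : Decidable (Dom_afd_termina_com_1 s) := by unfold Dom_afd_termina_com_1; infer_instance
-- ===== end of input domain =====

-- B replaces A's forward two-state DFA scan of the whole string with a backward
-- early-exit scan for the last binary digit (objective: simpler).


-- ===== PORT A =====
-- one iteration of A's loop: branch structure as in the Python
def pvStepA (estado : String) (char : Char) : String :=
  if estado = "q0" then
    if char = '0' then "q0" else if char = '1' then "q1" else estado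
  else if estado = "q1" then
    if char = '0' then "q0" else if char = '1' then "q1" else estado
  else estado

def afd_termina_com_1 (s : String) : Bool :=
  (s.toList.foldl pvStepA "q0") == "q1"

-- ===== PORT B =====
-- B's loop over reversed(s): return True at the first '1', False at the first '0'
def pvRevScan : List Char → Bool
  | [] => false
  | c :: cs => if c = '1' then true else if c = '0' then false else pvRevScan cs

def afd_termina_com_1_alt (s : String) : Bool :=
  pvRevScan s.toList.reverse

-- ===== PRECONDITION & SPEC =====
def Spec_afd_termina_com_1 (s : String) (out : Bool) : Prop := out = afd_termina_com_1_alt s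
instance (s : String) (out : Bool) : Decidable (Spec_afd_termina_com_1 s out) := by unfold Spec_afd_termina_com_1; infer_instance

-- ===== CLAIM (what is proved, stated in full; the proofs are below) =====
def Claim_equal_afd_termina_com_1 : Prop := ∀ (s : String), Dom_afd_termina_com_1 s → Spec_afd_termina_com_1 s (afd_termina_com_1 s)

-- ===== LEMMAS AND PROOFS =====

-- the DFA state stays in {"q0", "q1"}
theorem pvInv (l : List Char) (st : String) (h : st = "q0" ∨ st = "q1") :
    l.foldl pvStepA st = "q0" ∨ l.foldl pvStepA st = "q1" := by
  induction l generalizing st with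
  | nil => simpa using h
  | cons c cs ih =>
    apply ih
    rcases h with h | h <;> subst h <;> simp only [pvStepA] <;> split_ifs <;> simp

-- A's fold equals B's backward scan, up to the no-relevant-character case decided by st
theorem pvMain (l : List Char) (st : String) (h : st = "q0" ∨ st = "q1") :
    ((l.foldl pvStepA st) == "q1")
      = (pvRevScan l.reverse || (l.all (fun c => !(c == '1') && !(c == '0')) && (st == "q1"))) := by
  induction l using List.reverseRecOn generalizing st with
  | nil => simp [pvRevScan]
  | append_singleton l c ih =>
    rcases pvInv l st h with hx | hx <;>
    · by_cases h1 : c = '1'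
      · subst h1; simp [List.foldl_append, hx, pvStepA, pvRevScan]
      · by_cases h0 : c = '0'
        · subst h0; simp [List.foldl_append, hx, pvStepA, pvRevScan, h1]
        · simp only [List.foldl_append, List.reverse_append, List.reverse_singleton,
            List.singleton_append, pvRevScan, if_neg h1, if_neg h0, List.all_append, List.foldl_cons, List.foldl_nil,
            List.all_cons, List.all_nil]
          rw [show pvStepA (l.foldl pvStepA st) c = l.foldl pvStepA st by
            simp [pvStepA, hx, h1, h0]]
          rw [ih st h]
          have hc0 : (c == '0') = false := by simp [h0]
          have hc1 : (c == '1') = false := by simp [h1]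
          simp [hc0, hc1, Bool.and_comm]

-- ===== VERDICT (by name: the statement is the Claim_ definition above) =====
theorem afd_termina_com_1_spec : Claim_equal_afd_termina_com_1 := by
  intro s _
  unfold Spec_afd_termina_com_1 afd_termina_com_1 afd_termina_com_1_alt
  rw [pvMain s.toList "q0" (Or.inl rfl)]
  simp
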